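-- pv_equiv track=rewrite | github.com/NeroZero747/Python-Learning | scripts/_fix_realworld_l03_git.py | find_realworld_body
-- ===== SOURCE A (Python) =====
-- def find_realworld_body(html: str):
--     """Find start/end indices of the body div inside #real-world."""
--     section_pos = html.find('<section id="real-world">')
--     if section_pos == -1:
--         return None, None
--
--     # Body div may use space-y-5 or space-y-6 — search generically
--     marker_5 = '<div class="bg-white px-8 py-7 space-y-5">'
--     marker_6 = '<div class="bg-white px-8 py-7 space-y-6">'
--     pos_5 = html.find(marker_5, section_pos)
--     pos_6 = html.find(marker_6, section_pos)
--
--     if pos_5 == -1 and pos_6 == -1: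
--         return None, None
--
--     if pos_5 == -1:
--         body_start = pos_6
--         marker = marker_6
--     elif pos_6 == -1:
--         body_start = pos_5
--         marker = marker_5
--     else:
--         # pick whichever comes first
--         if pos_5 < pos_6:
--             body_start = pos_5
--             marker = marker_5
--         else:
--             body_start = pos_6
--             marker = marker_6
--
--     content_start = body_start + len(marker)
--     depth = 1
--     pos = content_start
--     while pos < len(html) and depth > 0:
--         next_open = html.find('<div', pos)
--         next_close = html.find('</div>', pos)
--         if next_close == -1:
--             break
--         if next_open != -1 and next_open < next_close:
--             depth += 1
--             pos = next_open + 4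
--         else:
--             depth -= 1
--             if depth == 0:
--                 return content_start, next_close
--             pos = next_close + 6
--     return None, None
-- ===== SOURCE B (Python) =====
-- def find_realworld_body(html: str):
--     """Find start/end indices of the body div inside #real-world."""
--     section_pos = html.find('<section id="real-world">')
--     if section_pos == -1:
--         return None, None
--
--     marker_5 = '<div class="bg-white px-8 py-7 space-y-5">'
--     marker_6 = '<div class="bg-white px-8 py-7 space-y-6">'
--     candidates = [p for p in (html.find(marker_5, section_pos),
--                               html.find(marker_6, section_pos)) if p != -1]
--     if not candidates:
--         return None, None
--     # both markers have the same length (42)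
--     content_start = min(candidates) + len(marker_5)
--
--     # ordered event list: every '<div' / '</div>' occurrence at or after
--     # content_start, in position order (opens and closes never coincide)
--     events = [(i, html.startswith('</div>', i))
--               for i in range(content_start, len(html))
--               if html.startswith('<div', i) or html.startswith('</div>', i)]
--
--     depth = 1
--     for i, is_close in events:
--         depth += -1 if is_close else 1
--         if depth == 0:
--             return content_start, i
--     return None, None
-- ===== Notes on version B (the rewrite author's own statement) =====
-- stated objective: alternative
-- what changed: B replaces A's find-and-jump while loop (repeated html.find for '<div'/'</div>' with position jumps and mutable depth/pos state) by building an ordered event list of all open/close tag occurrences from content_start in one index sweep and then folding a depth counter over that list; the marker choice collapses to min over the non-missing candidates since both markers have equal length.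
import Mathlib
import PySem

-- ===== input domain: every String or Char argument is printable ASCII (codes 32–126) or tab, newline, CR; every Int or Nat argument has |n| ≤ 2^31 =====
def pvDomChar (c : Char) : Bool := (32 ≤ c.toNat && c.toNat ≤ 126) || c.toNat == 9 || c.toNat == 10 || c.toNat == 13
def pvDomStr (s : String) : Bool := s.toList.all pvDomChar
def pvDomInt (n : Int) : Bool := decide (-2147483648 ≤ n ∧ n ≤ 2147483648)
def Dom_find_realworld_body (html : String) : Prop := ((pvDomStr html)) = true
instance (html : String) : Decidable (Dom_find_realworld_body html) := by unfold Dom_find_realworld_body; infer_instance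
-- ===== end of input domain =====

-- B builds an ordered open/close event list once and folds a depth counter over it,
-- instead of A's find-and-jump while loop; same result (alternative decomposition, not faster).

-- ===== PORT A =====
def pvSec : List Char := "<section id=\"real-world\">".toList
def pvM5 : List Char := "<div class=\"bg-white px-8 py-7 space-y-5\">".toList
def pvM6 : List Char := "<div class=\"bg-white px-8 py-7 space-y-6\">".toList
def pvOpen : List Char := ['<', 'd', 'i', 'v']
def pvClose : List Char := ['<', '/', 'd', 'i', 'v', '>']

-- A's while loop, step for step (fuel only makes the recursion total; length+1 is enough
-- since pos strictly increases each iteration and must stay below the length)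
def pvALoop (cs : List Char) (cstart : Int) : Nat → Int → Int → Option Int × Option Int
  | 0, _, _ => (none, none)
  | fuel+1, pos, depth =>
    if pos < (cs.length : Int) ∧ 0 < depth then
      let no := PySem.Chars.findFrom cs pvOpen pos none
      let nc := PySem.Chars.findFrom cs pvClose pos none
      if nc = -1 then (none, none)
      else if no ≠ -1 ∧ no < nc then pvALoop cs cstart fuel (no + 4) (depth + 1)
      else if depth - 1 = 0 then (some cstart, some nc)
      else pvALoop cs cstart fuel (nc + 6) (depth - 1)
    else (none, none)

def find_realworld_body (html : String) : Option Int × Option Int :=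
  let cs := html.toList
  let sectionPos := PySem.Chars.find cs pvSec
  if sectionPos = -1 then (none, none)
  else
    let pos5 := PySem.Chars.findFrom cs pvM5 sectionPos none
    let pos6 := PySem.Chars.findFrom cs pvM6 sectionPos none
    if pos5 = -1 ∧ pos6 = -1 then (none, none)
    else
      let bm : Int × Int :=
        if pos5 = -1 then (pos6, (pvM6.length : Int))
        else if pos6 = -1 then (pos5, (pvM5.length : Int))
        else if pos5 < pos6 then (pos5, (pvM5.length : Int))
        else (pos6, (pvM6.length : Int))
      let contentStart := bm.1 + bm.2
      pvALoop cs contentStart (cs.length + 1) contentStart 1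

-- ===== PORT B =====
-- ordered event list: (index, isClose) for every '<div' / '</div>' occurrence at or after cstart
def pvEvents (cs : List Char) (cstart : Int) : List (Int × Bool) :=
  (PySem.List.pyRange cstart (cs.length : Int) 1).filterMap (fun i =>
    if pvClose <+: cs.drop i.toNat then some (i, true)
    else if pvOpen <+: cs.drop i.toNat then some (i, false)
    else none)

def pvBScan (cstart : Int) : List (Int × Bool) → Int → Option Int × Option Int
  | [], _ => (none, none)
  | (i, c) :: rest, depth =>
    if depth + (if c then -1 else 1) = 0 then (some cstart, some i)
    else pvBScan cstart rest (depth + (if c then -1 else 1))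

def find_realworld_body_alt (html : String) : Option Int × Option Int :=
  let cs := html.toList
  let sectionPos := PySem.Chars.find cs pvSec
  if sectionPos = -1 then (none, none)
  else
    let p5 := PySem.Chars.findFrom cs pvM5 sectionPos none
    let p6 := PySem.Chars.findFrom cs pvM6 sectionPos none
    let cands := (if p5 ≠ -1 then [p5] else []) ++ (if p6 ≠ -1 then [p6] else [])
    match cands with
    | [] => (none, none)
    | c :: cs' =>
      let contentStart := cs'.foldl min c + (pvM5.length : Int)
      pvBScan contentStart (pvEvents cs contentStart) 1

-- ===== PRECONDITION & SPEC =====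
def Spec_find_realworld_body (html : String) (out : Option Int × Option Int) : Prop := out = find_realworld_body_alt html
instance (html : String) (out : Option Int × Option Int) : Decidable (Spec_find_realworld_body html out) := by unfold Spec_find_realworld_body; infer_instance

-- ===== CLAIM (what is proved, stated in full; the proofs are below) =====
def Claim_equal_find_realworld_body : Prop := ∀ (html : String), Dom_find_realworld_body html → Spec_find_realworld_body html (find_realworld_body html)

-- ===== LEMMAS AND PROOFS =====

-- both tag patterns start with '<'
lemma pv_not_event_cons {c : Char} {rest : List Char} (hc : c ≠ '<') {l : List Char}
    (h : l = c :: rest) :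
    ¬ pvClose <+: l ∧ ¬ pvOpen <+: l := by
  subst h
  constructor <;> rintro ⟨t, ht⟩ <;>
    simp only [pvClose, pvOpen, List.cons_append, List.cons.injEq] at ht <;>
    exact hc ht.1.symm

lemma pv_events_nil (cs : List Char) (pos : Int) (h : (cs.length : Int) ≤ pos) :
    pvEvents cs pos = [] := by
  unfold pvEvents
  rw [PySem.List.pyRange_one_eq_nil h]
  rfl

lemma pv_events_cons (cs : List Char) (pos : Int) (h : pos < (cs.length : Int)) :
    pvEvents cs pos =
      (if pvClose <+: cs.drop pos.toNat then [(pos, true)]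
       else if pvOpen <+: cs.drop pos.toNat then [(pos, false)] else [])
      ++ pvEvents cs (pos + 1) := by
  unfold pvEvents
  rw [PySem.List.pyRange_one_cons h, List.filterMap_cons]
  split_ifs <;> simp

lemma pv_events_skip (cs : List Char) (pos : Int)
    (h : pos < (cs.length : Int))
    (hne : ¬ pvClose <+: cs.drop pos.toNat) (hno : ¬ pvOpen <+: cs.drop pos.toNat) :
    pvEvents cs pos = pvEvents cs (pos + 1) := by
  rw [pv_events_cons cs pos h, if_neg hne, if_neg hno]
  rfl

-- skip a whole event-free stretch
lemma pv_events_skip_to (cs : List Char) (m : Int) : ∀ (n : Nat) (pos : Int), 0 ≤ pos →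
    pos + n = m →
    (∀ i : Nat, pos ≤ (i : Int) → (i : Int) < m →
       ¬ pvClose <+: cs.drop i ∧ ¬ pvOpen <+: cs.drop i) →
    pvEvents cs pos = pvEvents cs m := by
  intro n
  induction n with
  | zero =>
    intro pos _ hm _
    have : pos = m := by omega
    rw [this]
  | succ k ih =>
    intro pos hpos hm hno
    by_cases hlen : pos < (cs.length : Int)
    · have h := hno pos.toNat (by omega) (by omega)
      rw [pv_events_skip cs pos hlen h.1 h.2]
      exact ih (pos + 1) (by omega) (by omega)
        (fun i h1 h2 => hno i (by omega) h2)
    · rw [pv_events_nil cs pos (by omega), pv_events_nil cs m (by omega)]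

lemma pv_scan_no_close (cstart : Int) : ∀ (l : List (Int × Bool)) (depth : Int),
    0 < depth → (∀ e ∈ l, e.2 = false) → pvBScan cstart l depth = (none, none) := by
  intro l
  induction l with
  | nil => intro depth _ _; rfl
  | cons e rest ih =>
    intro depth hd hall
    obtain ⟨i, c⟩ := e
    have hc : c = false := hall (i, c) (by simp)
    subst hc
    show (if depth + 1 = 0 then _ else pvBScan cstart rest (depth + 1)) = (none, none)
    rw [if_neg (by omega)]
    exact ih (depth + 1) (by omega) (fun e he => hall e (by simp [he]))

-- membership in the event list
lemma pv_mem_events {cs : List Char} {pos : Int} {e : Int × Bool}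
    (h : e ∈ pvEvents cs pos) :
    pos ≤ e.1 ∧ e.1 < (cs.length : Int) ∧
      (e.2 = true → pvClose <+: cs.drop e.1.toNat) ∧
      (e.2 = false → pvOpen <+: cs.drop e.1.toNat) := by
  unfold pvEvents at h
  rw [List.mem_filterMap] at h
  obtain ⟨i, hi, hf⟩ := h
  rw [PySem.List.mem_pyRange_one] at hi
  split_ifs at hf with h1 h2
  · cases hf; exact ⟨hi.1, hi.2, fun _ => h1, fun hfalse => by simp at hfalse⟩
  · cases hf; exact ⟨hi.1, hi.2, fun htrue => by simp at htrue, fun _ => h2⟩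

-- prefix at a later index is an infix of the earlier drop
lemma pv_infix_of_prefix_drop {cs sub : List Char} {k i : Nat}
    (hki : k ≤ i) (h : sub <+: cs.drop i) : sub <:+: cs.drop k := by
  have : cs.drop i = (cs.drop k).drop (i - k) := by rw [List.drop_drop]; congr 1; omega
  rw [this] at h
  exact h.isInfix.trans (List.drop_suffix _ _).isInfix

-- the main loop equivalence: A's find-and-jump loop computes B's fold over the event list
lemma pv_loop_eq (cs : List Char) (cstart : Int) : ∀ (fuel : Nat) (pos depth : Int),
    0 ≤ pos → 0 < depth → (cs.length : Int) - pos < (fuel : Int) →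
    pvALoop cs cstart fuel pos depth = pvBScan cstart (pvEvents cs pos) depth := by
  intro fuel
  induction fuel with
  | zero =>
    intro pos depth h0 hd hf
    rw [pv_events_nil cs pos (by omega)]
    rfl
  | succ f ih =>
    intro pos depth h0 hd hf
    simp only [pvALoop]
    by_cases hlen : pos < (cs.length : Int)
    case neg =>
      have hcond : ¬(pos < (cs.length : Int) ∧ 0 < depth) := fun h => hlen h.1
      rw [if_neg hcond, pv_events_nil cs pos (by omega)]
      rfl
    case pos =>
      have hk : pos = ((pos.toNat : Nat) : Int) := by omega
      have hkle : pos.toNat ≤ cs.length := by omega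
      rw [if_pos ⟨hlen, hd⟩]
      set no := PySem.Chars.findFrom cs pvOpen pos none with hno
      set nc := PySem.Chars.findFrom cs pvClose pos none with hnc
      by_cases hc1 : nc = -1
      · -- no close anywhere at or after pos: every event is an open, depth never returns to 0
        rw [if_pos hc1]
        have hninf : ¬ pvClose <:+: cs.drop pos.toNat := by
          rw [← PySem.Chars.findFrom_natCast_eq_neg_one_iff cs pvClose pos.toNat hkle, ← hk]
          exact hc1
        rw [pv_scan_no_close cstart (pvEvents cs pos) depth hd ?_]
        intro e he
        obtain ⟨h1, h2, h3, _⟩ := pv_mem_events he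
        by_contra hne
        have : e.2 = true := by simpa using hne
        exact hninf (pv_infix_of_prefix_drop (show pos.toNat ≤ e.1.toNat by omega) (h3 this))
      · -- there is a next close
        rw [if_neg hc1]
        have hspecC := PySem.Chars.findFrom_natCast_spec cs pvClose pos.toNat hkle (by rw [← hk]; exact hc1)
        rw [← hk, ← hnc] at hspecC
        obtain ⟨hcge, hcpre, hcmin⟩ := hspecC
        have hclen : nc < (cs.length : Int) := by
          have := hcpre.length_le
          simp only [List.length_drop, pvClose, List.length_cons] at this
          omega
        by_cases hc2 : no ≠ -1 ∧ no < nc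
        · -- next event is an open at no
          rw [if_pos hc2]
          have hspecO := PySem.Chars.findFrom_natCast_spec cs pvOpen pos.toNat hkle (by rw [← hk]; exact hc2.1)
          rw [← hk, ← hno] at hspecO
          obtain ⟨hoge, hopre, homin⟩ := hspecO
          have holen : no < (cs.length : Int) := by
            have := hopre.length_le
            simp only [List.length_drop, pvOpen, List.length_cons] at this
            omega
          -- no events strictly before no
          have hskip1 : pvEvents cs pos = pvEvents cs no :=
            pv_events_skip_to cs no (no - pos).toNat pos h0 (by omega) (fun i hi1 hi2 =>
              ⟨fun hcl => hcmin i (by omega) (by omega) hcl,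
               fun hop => homin i (by omega) (by omega) hop⟩)
          -- event at no is an open (not a close, by minimality of nc since no < nc)
          have hnotclose : ¬ pvClose <+: cs.drop no.toNat :=
            fun hcl => hcmin no.toNat (by omega) (by omega) hcl
          obtain ⟨t, ht⟩ := hopre
          have hdrop0 : cs.drop no.toNat = pvOpen ++ t := ht.symm
          have hdropj : ∀ j : Nat, j ≤ 4 → cs.drop (no.toNat + j) = pvOpen.drop j ++ t := by
            intro j hj
            have h2 : cs.drop (no.toNat + j) = (cs.drop no.toNat).drop j := by
              rw [List.drop_drop]
            rw [h2, hdrop0, List.drop_append_of_le_length (by simp [pvOpen]; omega)]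
          -- no events at no+1, no+2, no+3
          have hgap : ∀ i : Nat, no + 1 ≤ (i : Int) → (i : Int) < no + 4 →
              ¬ pvClose <+: cs.drop i ∧ ¬ pvOpen <+: cs.drop i := by
            intro i hi1 hi2
            have hi : i = no.toNat + 1 ∨ i = no.toNat + 2 ∨ i = no.toNat + 3 := by omega
            rcases hi with hi | hi | hi <;> subst hi
            · exact pv_not_event_cons (c := 'd') (by decide) (by rw [hdropj 1 (by omega)]; rfl)
            · exact pv_not_event_cons (c := 'i') (by decide) (by rw [hdropj 2 (by omega)]; rfl)
            · exact pv_not_event_cons (c := 'v') (by decide) (by rw [hdropj 3 (by omega)]; rfl)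
          have hcons : pvEvents cs no = (no, false) :: pvEvents cs (no + 4) := by
            rw [pv_events_cons cs no holen, if_neg hnotclose,
              if_pos (show pvOpen <+: cs.drop no.toNat from ⟨t, ht⟩)]
            rw [pv_events_skip_to cs (no + 4) 3 (no + 1) (by omega) (by omega) hgap]
            rfl
          rw [hskip1, hcons]
          show _ = (if depth + 1 = 0 then (some cstart, some no)
                    else pvBScan cstart (pvEvents cs (no + 4)) (depth + 1))
          rw [if_neg (show ¬ depth + 1 = 0 by omega)]
          exact ih (no + 4) (depth + 1) (by omega) (by omega) (by omega)
        · -- next event is the close at nc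
          rw [if_neg hc2]
          have hnoopen : ∀ i : Nat, pos ≤ (i : Int) → (i : Int) < nc → ¬ pvOpen <+: cs.drop i := by
            intro i hi1 hi2 hop
            by_cases ho1 : no = -1
            · have hninf : ¬ pvOpen <:+: cs.drop pos.toNat := by
                rw [← PySem.Chars.findFrom_natCast_eq_neg_one_iff cs pvOpen pos.toNat hkle, ← hk]
                exact ho1
              exact hninf (pv_infix_of_prefix_drop (show pos.toNat ≤ i by omega) hop)
            · have hspecO := PySem.Chars.findFrom_natCast_spec cs pvOpen pos.toNat hkle (by rw [← hk]; exact ho1)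
              rw [← hk, ← hno] at hspecO
              have hge : nc ≤ no := by
                rcases lt_or_ge no nc with h | h
                · exact absurd ⟨ho1, h⟩ hc2
                · exact h
              exact hspecO.2.2 i (by omega) (by omega) hop
          have hskip1 : pvEvents cs pos = pvEvents cs nc :=
            pv_events_skip_to cs nc (nc - pos).toNat pos h0 (by omega) (fun i hi1 hi2 =>
              ⟨fun hcl => hcmin i (by omega) (by omega) hcl,
               hnoopen i hi1 hi2⟩)
          obtain ⟨t, ht⟩ := hcpre
          have hdrop0 : cs.drop nc.toNat = pvClose ++ t := ht.symm
          have hdropj : ∀ j : Nat, j ≤ 6 → cs.drop (nc.toNat + j) = pvClose.drop j ++ t := by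
            intro j hj
            have h2 : cs.drop (nc.toNat + j) = (cs.drop nc.toNat).drop j := by
              rw [List.drop_drop]
            rw [h2, hdrop0, List.drop_append_of_le_length (by simp [pvClose]; omega)]
          have hgap : ∀ i : Nat, nc + 1 ≤ (i : Int) → (i : Int) < nc + 6 →
              ¬ pvClose <+: cs.drop i ∧ ¬ pvOpen <+: cs.drop i := by
            intro i hi1 hi2
            have hi : i = nc.toNat + 1 ∨ i = nc.toNat + 2 ∨ i = nc.toNat + 3 ∨
                i = nc.toNat + 4 ∨ i = nc.toNat + 5 := by omega
            rcases hi with hi | hi | hi | hi | hi <;> subst hi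
            · exact pv_not_event_cons (c := '/') (by decide) (by rw [hdropj 1 (by omega)]; rfl)
            · exact pv_not_event_cons (c := 'd') (by decide) (by rw [hdropj 2 (by omega)]; rfl)
            · exact pv_not_event_cons (c := 'i') (by decide) (by rw [hdropj 3 (by omega)]; rfl)
            · exact pv_not_event_cons (c := 'v') (by decide) (by rw [hdropj 4 (by omega)]; rfl)
            · exact pv_not_event_cons (c := '>') (by decide) (by rw [hdropj 5 (by omega)]; rfl)
          have hcons : pvEvents cs nc = (nc, true) :: pvEvents cs (nc + 6) := by
            rw [pv_events_cons cs nc hclen,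
              if_pos (show pvClose <+: cs.drop nc.toNat from ⟨t, ht⟩)]
            rw [pv_events_skip_to cs (nc + 6) 5 (nc + 1) (by omega) (by omega) hgap]
            rfl
          rw [hskip1, hcons]
          show _ = (if depth - 1 = 0 then (some cstart, some nc)
                    else pvBScan cstart (pvEvents cs (nc + 6)) (depth - 1))
          by_cases hz : depth - 1 = 0
          · rw [if_pos hz, if_pos hz]
          · rw [if_neg hz, if_neg hz]
            exact ih (nc + 6) (depth - 1) (by omega) (by omega) (by omega)

-- a successful findFrom result is at least the (nonnegative) start
lemma pv_findFrom_ge {cs sub : List Char} {start : Int}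
    (h0 : 0 ≤ start) (hle : start ≤ (cs.length : Int))
    (h : PySem.Chars.findFrom cs sub start none ≠ -1) :
    start ≤ PySem.Chars.findFrom cs sub start none := by
  have hk : start = ((start.toNat : Nat) : Int) := by omega
  rw [hk] at h ⊢
  exact (PySem.Chars.findFrom_natCast_spec cs sub start.toNat (by omega) h).1

-- ===== VERDICT (by name: the statement is the Claim_ definition above) =====
theorem find_realworld_body_spec : Claim_equal_find_realworld_body := by
  intro html _
  show find_realworld_body html = find_realworld_body_alt html
  simp only [find_realworld_body, find_realworld_body_alt]
  set cs := html.toList with hcs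
  set sp := PySem.Chars.find cs pvSec with hsp
  by_cases h1 : sp = -1
  · rw [if_pos h1, if_pos h1]
  · rw [if_neg h1, if_neg h1]
    have hsp0 : 0 ≤ sp := by
      have := PySem.Chars.neg_one_le_find cs pvSec
      rw [← hsp] at this
      omega
    have hsple : sp ≤ (cs.length : Int) := by
      have := PySem.Chars.find_le_length cs pvSec
      rw [← hsp] at this
      exact_mod_cast this
    set p5 := PySem.Chars.findFrom cs pvM5 sp none with hp5
    set p6 := PySem.Chars.findFrom cs pvM6 sp none with hp6
    have hl5 : (pvM5.length : Int) = 42 := by decide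
    have hl6 : (pvM6.length : Int) = 42 := by decide
    by_cases h5 : p5 = -1 <;> by_cases h6 : p6 = -1
    · have hb : (p5 = -1 ∧ p6 = -1) := ⟨h5, h6⟩
      rw [if_pos hb, if_neg (not_not_intro h5), if_neg (not_not_intro h6)]
      rfl
    · have hb : ¬(p5 = -1 ∧ p6 = -1) := fun h => h6 h.2
      have hge : sp ≤ p6 := pv_findFrom_ge hsp0 hsple h6
      rw [if_neg hb, if_pos h5, if_neg (not_not_intro h5), if_pos h6, List.nil_append]
      show pvALoop cs (p6 + (pvM6.length : Int)) (cs.length + 1) (p6 + (pvM6.length : Int)) 1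
        = pvBScan (p6 + (pvM5.length : Int)) (pvEvents cs (p6 + (pvM5.length : Int))) 1
      rw [hl5, hl6,
        pv_loop_eq cs (p6 + 42) (cs.length + 1) (p6 + 42) 1 (by omega) (by omega)
          (by push_cast; omega)]
    · have hb : ¬(p5 = -1 ∧ p6 = -1) := fun h => h5 h.1
      have hge : sp ≤ p5 := pv_findFrom_ge hsp0 hsple h5
      rw [if_neg hb, if_neg h5, if_pos h6, if_pos h5, if_neg (not_not_intro h6)]
      show pvALoop cs (p5 + (pvM5.length : Int)) (cs.length + 1) (p5 + (pvM5.length : Int)) 1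
        = pvBScan (p5 + (pvM5.length : Int)) (pvEvents cs (p5 + (pvM5.length : Int))) 1
      rw [hl5,
        pv_loop_eq cs (p5 + 42) (cs.length + 1) (p5 + 42) 1 (by omega) (by omega)
          (by push_cast; omega)]
    · have hb : ¬(p5 = -1 ∧ p6 = -1) := fun h => h5 h.1
      have hge5 : sp ≤ p5 := pv_findFrom_ge hsp0 hsple h5
      have hge6 : sp ≤ p6 := pv_findFrom_ge hsp0 hsple h6
      rw [if_neg hb, if_neg h5, if_neg h6, if_pos h5, if_pos h6]
      by_cases hlt : p5 < p6
      · rw [if_pos hlt]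
        show pvALoop cs (p5 + (pvM5.length : Int)) (cs.length + 1) (p5 + (pvM5.length : Int)) 1
          = pvBScan (List.foldl min p5 [p6] + (pvM5.length : Int))
              (pvEvents cs (List.foldl min p5 [p6] + (pvM5.length : Int))) 1
        simp only [List.foldl]
        rw [min_eq_left (le_of_lt hlt), hl5,
          pv_loop_eq cs (p5 + 42) (cs.length + 1) (p5 + 42) 1 (by omega) (by omega)
            (by push_cast; omega)]
      · rw [if_neg hlt]
        show pvALoop cs (p6 + (pvM6.length : Int)) (cs.length + 1) (p6 + (pvM6.length : Int)) 1
          = pvBScan (List.foldl min p5 [p6] + (pvM5.length : Int))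
              (pvEvents cs (List.foldl min p5 [p6] + (pvM5.length : Int))) 1
        simp only [List.foldl]
        rw [min_eq_right (le_of_not_gt hlt), hl5, hl6,
          pv_loop_eq cs (p6 + 42) (cs.length + 1) (p6 + 42) 1 (by omega) (by omega)
            (by push_cast; omega)]
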